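-- pv_equiv track=rewrite | github.com/yii41/google-step | week1/hw-2.py | find_max_score_anagram
-- ===== SOURCE A (Python) =====
-- from collections import Counter
--
-- def calculate_score(word):
--     scores = {'a': 1, 'b': 3, 'c': 2, 'd': 2, 'e': 1, 'f': 3, 'g': 3, 'h': 1, 'i': 1, 'j': 4, 'k': 4, 'l': 2, 'm': 2, 'n': 1, 'o': 1, 'p': 3, 'q': 4, 'r': 1, 's': 1, 't': 1, 'u': 2, 'v': 3, 'w': 3, 'x': 4, 'y': 3, 'z': 4}
--     score = 0
--     for letter in word:
--         score += scores[letter]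
--     return score
--
-- def find_max_score_anagram(random_word, dictionary):
--     count_letters_random_word = Counter(random_word)
--     anagrams = [word for word in dictionary if all(count_letters_random_word[char] >= count for char, count in Counter(word).items())]
--
--     max_score = 0
--     max_score_anagram = ""
--
--     for anagram in anagrams:
--         score = calculate_score(anagram)
--         if score > max_score:
--             max_score = score
--             max_score_anagram = anagram
--     return max_score_anagram
-- ===== SOURCE B (Python) =====
-- from collections import Counter
--
--
-- def find_max_score_anagram(random_word, dictionary):
--     scores = {'a': 1, 'b': 3, 'c': 2, 'd': 2, 'e': 1, 'f': 3, 'g': 3, 'h': 1, 'i': 1, 'j': 4, 'k': 4, 'l': 2, 'm': 2, 'n': 1, 'o': 1, 'p': 3, 'q': 4, 'r': 1, 's': 1, 't': 1, 'u': 2, 'v': 3, 'w': 3, 'x': 4, 'y': 3, 'z': 4}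
--     avail = Counter(random_word)
--     valid = [word for word in dictionary if not (Counter(word) - avail)]
--     ranked = sorted(valid, key=lambda word: -sum(scores[c] for c in word))
--     return ranked[0] if ranked else ""
-- ===== Notes on version B (the rewrite author's own statement) =====
-- stated objective: alternative
-- what changed: A's running-max loop over the filtered anagram list is replaced by a stable descending sort by score of that list (ties resolved by dictionary order via sort stability), returning its first element or '' when empty; the multiset filter is expressed as emptiness of the Counter difference.
import Mathlib
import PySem

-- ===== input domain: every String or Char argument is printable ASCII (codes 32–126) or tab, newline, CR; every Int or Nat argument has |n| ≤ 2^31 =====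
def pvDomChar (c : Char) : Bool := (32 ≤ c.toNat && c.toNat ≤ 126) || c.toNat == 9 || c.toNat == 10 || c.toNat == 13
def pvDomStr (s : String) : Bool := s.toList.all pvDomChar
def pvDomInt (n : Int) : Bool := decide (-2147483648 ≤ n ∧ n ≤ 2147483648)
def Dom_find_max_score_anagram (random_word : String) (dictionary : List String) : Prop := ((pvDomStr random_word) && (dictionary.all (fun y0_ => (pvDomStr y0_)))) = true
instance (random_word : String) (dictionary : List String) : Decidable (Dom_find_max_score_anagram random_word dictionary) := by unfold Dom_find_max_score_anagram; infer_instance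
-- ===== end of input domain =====

-- B replaces A's running-max loop by a stable descending sort of the (same) filtered anagram
-- list, returning its first element; objective: alternative decomposition, same asymptotics.

-- ===== PORT A =====
-- the letter-score table shared by both Pythons
def pvScores : PySem.Dict Char Int := PySem.Dict.ofList
  [('a',1),('b',3),('c',2),('d',2),('e',1),('f',3),('g',3),('h',1),('i',1),('j',4),('k',4),('l',2),('m',2),('n',1),('o',1),('p',3),('q',4),('r',1),('s',1),('t',1),('u',2),('v',3),('w',3),('x',4),('y',3),('z',4)]

-- port of calculate_score; 'scores[letter]' raises KeyError on a char outside the table — modeled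
-- with default 0; Pre_ guarantees every scored char is a lowercase letter, so the lookup always hits
def calculate_score (word : String) : Int :=
  word.toList.foldl (fun score letter => score + pvScores.getD letter 0) 0

def find_max_score_anagram (random_word : String) (dictionary : List String) : String :=
  let count_letters_random_word := PySem.Dict.counter random_word.toList
  let anagrams := dictionary.filter (fun word =>
    (PySem.Dict.counter word.toList).items.all
      (fun p => decide (count_letters_random_word.getD p.1 0 ≥ p.2)))
  let r := anagrams.foldl (fun (acc : Int × String) anagram =>
    let score := calculate_score anagram
    if score > acc.1 then (score, anagram) else acc) (0, "")
  r.2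

-- ===== PORT B =====
-- sum(scores[c] for c in word); same KeyError modeling as in calculate_score, covered by Pre_
def pvScoreSum (word : String) : Int := (word.toList.map (fun c => pvScores.getD c 0)).sum

def find_max_score_anagram_alt (random_word : String) (dictionary : List String) : String :=
  let avail := PySem.Dict.counter random_word.toList
  let valid := dictionary.filter (fun word =>
    ((PySem.Dict.counter word.toList).items.filter
      (fun p => decide (p.2 - avail.getD p.1 0 > 0))).isEmpty)
  let ranked := PySem.List.sorted valid (fun word => -pvScoreSum word)
  match ranked with
  | [] => ""
  | h :: _ => h

-- ===== PRECONDITION & SPEC =====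
-- Pre_ excludes exactly the inputs where A raises KeyError: a dictionary word that fits into
-- random_word's letter multiset (so it reaches the scoring loop) but contains a non-lowercase char.
def Pre_find_max_score_anagram (random_word : String) (dictionary : List String) : Prop :=
  ∀ w ∈ dictionary,
    (w.toList.all (fun c => decide (w.toList.count c ≤ random_word.toList.count c)) = true) →
    w.toList.all (fun c => decide ('a' ≤ c ∧ c ≤ 'z')) = true
instance (random_word : String) (dictionary : List String) : Decidable (Pre_find_max_score_anagram random_word dictionary) := by unfold Pre_find_max_score_anagram; infer_instance

def pvWitness_find_max_score_anagram : String × List String := ("listen", ["silent", "tin", "net!", "is"])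

def Spec_find_max_score_anagram (random_word : String) (dictionary : List String) (out : String) : Prop := out = find_max_score_anagram_alt random_word dictionary
instance (random_word : String) (dictionary : List String) (out : String) : Decidable (Spec_find_max_score_anagram random_word dictionary out) := by unfold Spec_find_max_score_anagram; infer_instance

-- ===== CLAIM (what is proved, stated in full; the proofs are below) =====
def Claim_equal_find_max_score_anagram : Prop := ∀ (random_word : String) (dictionary : List String), Dom_find_max_score_anagram random_word dictionary → Pre_find_max_score_anagram random_word dictionary → Spec_find_max_score_anagram random_word dictionary (find_max_score_anagram random_word dictionary)

-- ===== LEMMAS AND PROOFS =====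

-- every value of the score table is between 1 and 4
lemma pvScores_getD_bounds (c : Char) : pvScores.getD c 0 = 0 ∨ (1 ≤ pvScores.getD c 0 ∧ pvScores.getD c 0 ≤ 4) := by
  rcases h : pvScores.get? c with _ | v
  · left; exact PySem.Dict.getD_of_get?_eq_none pvScores 0 h
  · right
    rw [PySem.Dict.getD_of_get?_eq_some pvScores 0 h]
    have hm : (c, v) ∈ pvScores.items := PySem.Dict.mem_items_of_get?_eq_some pvScores h
    have hv : v ∈ pvScores.items.map Prod.snd := List.mem_map_of_mem hm
    have hL : pvScores.items.map Prod.snd = [1,3,2,2,1,3,3,1,1,4,4,2,2,1,1,3,4,1,1,1,2,3,3,4,3,4] := by decide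
    rw [hL] at hv
    fin_cases hv <;> omega

lemma pvScores_getD_nonneg (c : Char) : 0 ≤ pvScores.getD c 0 := by
  rcases pvScores_getD_bounds c with h | h <;> omega

-- a lowercase letter is a key of the score table, with a positive score
lemma pvScores_getD_pos (c : Char) (h1 : 'a' ≤ c) (h2 : c ≤ 'z') : 1 ≤ pvScores.getD c 0 := by
  have hk : c ∈ pvScores.keys := by
    have hK : pvScores.keys = ['a','b','c','d','e','f','g','h','i','j','k','l','m','n','o','p','q','r','s','t','u','v','w','x','y','z'] := by decide
    rw [hK]
    have b1 : 97 ≤ c.toNat := h1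
    have b2 : c.toNat ≤ 122 := h2
    have : c.toNat = 97 ∨ c.toNat = 98 ∨ c.toNat = 99 ∨ c.toNat = 100 ∨ c.toNat = 101 ∨ c.toNat = 102 ∨ c.toNat = 103 ∨ c.toNat = 104 ∨ c.toNat = 105 ∨ c.toNat = 106 ∨ c.toNat = 107 ∨ c.toNat = 108 ∨ c.toNat = 109 ∨ c.toNat = 110 ∨ c.toNat = 111 ∨ c.toNat = 112 ∨ c.toNat = 113 ∨ c.toNat = 114 ∨ c.toNat = 115 ∨ c.toNat = 116 ∨ c.toNat = 117 ∨ c.toNat = 118 ∨ c.toNat = 119 ∨ c.toNat = 120 ∨ c.toNat = 121 ∨ c.toNat = 122 := by omega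
    rcases this with h|h|h|h|h|h|h|h|h|h|h|h|h|h|h|h|h|h|h|h|h|h|h|h|h|h <;>
      (have : c = Char.ofNat c.toNat := (Char.ofNat_toNat c).symm) <;>
      rw [h] at this <;> subst this <;> decide
  have hcont : pvScores.contains c = true := by
    rw [PySem.Dict.contains_iff_mem_keys]; exact hk
  rcases h : pvScores.get? c with _ | v
  · rw [PySem.Dict.get?_eq_none_iff_contains] at h
    simp [hcont] at h
  · rw [PySem.Dict.getD_of_get?_eq_some pvScores 0 h]
    have hm : (c, v) ∈ pvScores.items := PySem.Dict.mem_items_of_get?_eq_some pvScores h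
    have hv : v ∈ pvScores.items.map Prod.snd := List.mem_map_of_mem hm
    have hL : pvScores.items.map Prod.snd = [1,3,2,2,1,3,3,1,1,4,4,2,2,1,1,3,4,1,1,1,2,3,3,4,3,4] := by decide
    rw [hL] at hv
    fin_cases hv <;> omega

lemma calculate_score_eq (w : String) : calculate_score w = pvScoreSum w := by
  simp [calculate_score, pvScoreSum, PySem.List.foldl_add]

lemma pvScoreSum_nonneg (w : String) : 0 ≤ pvScoreSum w := by
  unfold pvScoreSum
  induction w.toList with
  | nil => simp
  | cons c t ih => simp only [List.map_cons, List.sum_cons]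
                   have := pvScores_getD_nonneg c; omega

-- a nonempty all-lowercase word has a positive score
lemma pvScoreSum_pos (w : String) (hne : w ≠ "") (hlc : ∀ c ∈ w.toList, 'a' ≤ c ∧ c ≤ 'z') :
    0 < pvScoreSum w := by
  unfold pvScoreSum
  apply List.sum_pos
  · intro x hx
    rcases List.mem_map.mp hx with ⟨c, hc, rfl⟩
    have := pvScores_getD_pos c (hlc c hc).1 (hlc c hc).2
    omega
  · simp only [ne_eq, List.map_eq_nil_iff]
    intro h
    exact hne (String.toList_eq_nil_iff.mp h)

-- the two multiset filters are the same Boolean test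
lemma filter_pred_eq (cnt : PySem.Dict Char Int) (w : String) :
    ((PySem.Dict.counter w.toList).items.filter
      (fun p => decide (p.2 - cnt.getD p.1 0 > 0))).isEmpty
    = (PySem.Dict.counter w.toList).items.all (fun p => decide (cnt.getD p.1 0 ≥ p.2)) := by
  rw [Bool.eq_iff_iff]
  simp only [List.isEmpty_iff, List.filter_eq_nil_iff, List.all_eq_true, decide_eq_true_eq]
  constructor
  · intro h p hp; have := h p hp; omega
  · intro h p hp; have := h p hp; omega

-- A's filter test, read as a per-character count condition
lemma filterA_iff (rw : String) (w : String) :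
    ((PySem.Dict.counter w.toList).items.all
      (fun p => decide ((PySem.Dict.counter rw.toList).getD p.1 0 ≥ p.2)) = true)
    ↔ ∀ c ∈ w.toList, w.toList.count c ≤ rw.toList.count c := by
  rw [PySem.Dict.items_counter]
  simp only [List.all_eq_true, List.mem_map, decide_eq_true_eq]
  constructor
  · intro h c hc
    have := h (c, (w.toList.count c : Int)) ⟨c, (PySem.Set.mem_ofList _ _).mpr hc, rfl⟩
    rw [PySem.Dict.getD_counter] at this
    simp only at this
    exact_mod_cast this
  · rintro h p ⟨c, hc, rfl⟩
    rw [PySem.Dict.getD_counter]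
    simp only
    exact_mod_cast h c ((PySem.Set.mem_ofList _ _).mp hc)

-- invariant carried through the parallel left folds: A's running max against B's insertion sort
lemma loop_inv (sc : String → Int) (l : List String) :
    ∀ (acc : List String) (m : Int) (s : String),
    (∀ w ∈ l, 0 ≤ sc w) →
    (∀ a ∈ acc, 0 ≤ sc a) →
    (match acc with
     | [] => m = 0 ∧ s = ""
     | h :: _ => (m = sc h ∧ s = h) ∨ (sc h ≤ 0 ∧ m = 0 ∧ s = "")) →
    ((∀ a ∈ l.foldl (fun a x => PySem.List.insertBy (fun a b => decide (-sc a < -sc b)) x a) acc, 0 ≤ sc a) ∧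
     (match l.foldl (fun a x => PySem.List.insertBy (fun a b => decide (-sc a < -sc b)) x a) acc with
      | [] => (l.foldl (fun (p : Int × String) w => if sc w > p.1 then (sc w, w) else p) (m, s)).1 = 0 ∧
              (l.foldl (fun (p : Int × String) w => if sc w > p.1 then (sc w, w) else p) (m, s)).2 = ""
      | h :: _ => ((l.foldl (fun (p : Int × String) w => if sc w > p.1 then (sc w, w) else p) (m, s)).1 = sc h ∧
                   (l.foldl (fun (p : Int × String) w => if sc w > p.1 then (sc w, w) else p) (m, s)).2 = h) ∨
                  (sc h ≤ 0 ∧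
                   (l.foldl (fun (p : Int × String) w => if sc w > p.1 then (sc w, w) else p) (m, s)).1 = 0 ∧
                   (l.foldl (fun (p : Int × String) w => if sc w > p.1 then (sc w, w) else p) (m, s)).2 = ""))) := by
  induction l with
  | nil => intro acc m s _ hacc hinv; exact ⟨hacc, hinv⟩
  | cons w l ih =>
    intro acc m s hl hacc hinv
    simp only [List.foldl_cons]
    have hw : 0 ≤ sc w := hl w List.mem_cons_self
    have hl' : ∀ x ∈ l, 0 ≤ sc x := fun x hx => hl x (List.mem_cons_of_mem _ hx)
    cases acc with
    | nil =>
      obtain ⟨rfl, rfl⟩ := hinv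
      have hacc1 : PySem.List.insertBy (fun a b => decide (-sc a < -sc b)) w ([] : List String) = [w] := rfl
      rw [hacc1]
      have hmem1 : ∀ a ∈ [w], 0 ≤ sc a := by intro a ha; simp at ha; subst ha; exact hw
      by_cases hgt : sc w > 0
      · rw [if_pos hgt]
        exact ih [w] (sc w) w hl' hmem1 (Or.inl ⟨rfl, rfl⟩)
      · rw [if_neg hgt]
        exact ih [w] 0 "" hl' hmem1 (Or.inr ⟨by omega, rfl, rfl⟩)
    | cons h t =>
      have hh : 0 ≤ sc h := hacc h List.mem_cons_self
      by_cases hins : sc h < sc w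
      · have hacc1 : PySem.List.insertBy (fun a b => decide (-sc a < -sc b)) w (h :: t) = w :: h :: t := by
          simp only [PySem.List.insertBy, decide_eq_true_eq]
          rw [if_pos (by omega)]
        rw [hacc1]
        have hmem1 : ∀ a ∈ w :: h :: t, 0 ≤ sc a := by
          intro a ha
          rcases List.mem_cons.mp ha with rfl | ha
          · exact hw
          · exact hacc a ha
        rcases hinv with ⟨hm, hs⟩ | ⟨hh0, hm, hs⟩
        · rw [if_pos (show sc w > m by omega)]
          exact ih _ _ _ hl' hmem1 (Or.inl ⟨rfl, rfl⟩)
        · rw [if_pos (show sc w > m by omega)]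
          exact ih _ _ _ hl' hmem1 (Or.inl ⟨rfl, rfl⟩)
      · have hacc1 : PySem.List.insertBy (fun a b => decide (-sc a < -sc b)) w (h :: t) =
            h :: PySem.List.insertBy (fun a b => decide (-sc a < -sc b)) w t := by
          simp only [PySem.List.insertBy, decide_eq_true_eq]
          rw [if_neg (by omega)]
        rw [hacc1]
        have hmem1 : ∀ a ∈ h :: PySem.List.insertBy (fun a b => decide (-sc a < -sc b)) w t, 0 ≤ sc a := by
          intro a ha
          rcases List.mem_cons.mp ha with rfl | ha
          · exact hh
          · rcases (PySem.List.mem_insertBy _ _ _ _).mp ha with rfl | ha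
            · exact hw
            · exact hacc a (List.mem_cons_of_mem _ ha)
        rcases hinv with ⟨hm, hs⟩ | ⟨hh0, hm, hs⟩
        · rw [if_neg (show ¬ sc w > m by omega)]
          exact ih _ _ _ hl' hmem1 (Or.inl ⟨hm, hs⟩)
        · rw [if_neg (show ¬ sc w > m by omega)]
          exact ih _ _ _ hl' hmem1 (Or.inr ⟨hh0, hm, hs⟩)

-- ===== VERDICT (by name: the statement is the Claim_ definition above) =====
theorem find_max_score_anagram_spec : Claim_equal_find_max_score_anagram := by
  intro rw dict _ hpre
  unfold Spec_find_max_score_anagram find_max_score_anagram find_max_score_anagram_alt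
  simp only []
  -- identify the two filtered lists
  have hfil : dict.filter (fun word =>
      ((PySem.Dict.counter word.toList).items.filter
        (fun p => decide (p.2 - (PySem.Dict.counter rw.toList).getD p.1 0 > 0))).isEmpty)
      = dict.filter (fun word =>
      (PySem.Dict.counter word.toList).items.all
        (fun p => decide ((PySem.Dict.counter rw.toList).getD p.1 0 ≥ p.2))) := by
    apply List.filter_congr
    intro w _
    exact filter_pred_eq _ w
  rw [hfil]
  set l := dict.filter (fun word =>
      (PySem.Dict.counter word.toList).items.all
        (fun p => decide ((PySem.Dict.counter rw.toList).getD p.1 0 ≥ p.2))) with hl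
  -- every word of the filtered list is all-lowercase
  have hlc : ∀ w ∈ l, ∀ c ∈ w.toList, 'a' ≤ c ∧ c ≤ 'z' := by
    intro w hw
    have hmem := List.mem_of_mem_filter hw
    have hp := List.of_mem_filter hw
    have hcnt := (filterA_iff rw w).mp hp
    have := hpre w hmem (by simp only [List.all_eq_true, decide_eq_true_eq]; exact hcnt)
    simpa only [List.all_eq_true, decide_eq_true_eq] using this
  -- replace calculate_score by pvScoreSum in A's fold
  have hsc : (l.foldl (fun (acc : Int × String) anagram =>
        let score := calculate_score anagram
        if score > acc.1 then (score, anagram) else acc) (0, ""))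
      = (l.foldl (fun (p : Int × String) w => if pvScoreSum w > p.1 then (pvScoreSum w, w) else p) (0, "")) := by
    apply List.foldl_ext
    intro p w _
    simp only [calculate_score_eq]
  rw [hsc]
  -- the sort as a left fold of insertions
  rw [PySem.List.sorted_eq_foldl_insertBy]
  obtain ⟨hnn, hmain⟩ := loop_inv pvScoreSum l [] 0 ""
    (fun w _ => pvScoreSum_nonneg w) (by intro a ha; cases ha) ⟨rfl, rfl⟩
  rcases hfold : l.foldl (fun a x => PySem.List.insertBy (fun a b => decide (-pvScoreSum a < -pvScoreSum b)) x a) [] with _ | ⟨h, t⟩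
  all_goals rw [hfold] at hmain
  · exact hmain.2
  · rcases hmain with ⟨_, h2⟩ | ⟨hh0, _, h2⟩
    · exact h2
    · -- head scores ≤ 0, hence = 0, hence it is the empty word
      have hhl : h ∈ l := by
        have hperm : (PySem.List.sorted l (fun word => -pvScoreSum word)).Perm l :=
          PySem.List.sorted_perm l _ _
        have : h ∈ PySem.List.sorted l (fun word => -pvScoreSum word) := by
          rw [PySem.List.sorted_eq_foldl_insertBy, hfold]; exact List.mem_cons_self
        exact hperm.mem_iff.mp this
      have hh : h = "" := by
        by_contra hne
        have := pvScoreSum_pos h hne (hlc h hhl)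
        omega
      rw [h2, hh]
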